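-- pv_equiv track=rewrite | github.com/danieleschmidt/customer-churn-predictor-mlops | src/advanced_security.py | _generate_vulnerability_recommendations
-- ===== SOURCE A (Python) =====
-- from typing import Dict, List, Tuple, Any, Optional, Union, Set, Callable
--
-- def _generate_vulnerability_recommendations(vulnerabilities: List[Dict]) -> List[str]:
--     """Generate recommendations based on vulnerabilities."""
--     recommendations = []
--
--     if any(v['type'] == 'unencrypted_data' for v in vulnerabilities):
--         recommendations.append("Implement comprehensive data encryption strategy")
--
--     if any(v['type'] == 'weak_passwords' for v in vulnerabilities):
--         recommendations.append("Strengthen password policy and implement MFA")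
--
--     if any(v['type'] == 'outdated_dependencies' for v in vulnerabilities):
--         recommendations.append("Establish regular dependency update schedule")
--
--     if any(v['type'] == 'excessive_permissions' for v in vulnerabilities):
--         recommendations.append("Conduct access review and implement least privilege principle")
--
--     recommendations.append("Schedule regular security assessments")
--     recommendations.append("Implement continuous security monitoring")
--
--     return recommendations
-- ===== SOURCE B (Python) =====
-- _BIT = {
--     'unencrypted_data': 1,
--     'weak_passwords': 2,
--     'outdated_dependencies': 4,
--     'excessive_permissions': 8,
-- }
--
-- _BIT_MESSAGES = (
--     (1, "Implement comprehensive data encryption strategy"),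
--     (2, "Strengthen password policy and implement MFA"),
--     (4, "Establish regular dependency update schedule"),
--     (8, "Conduct access review and implement least privilege principle"),
-- )
--
-- def _generate_vulnerability_recommendations(vulnerabilities):
--     """Generate recommendations: one pass OR-ing a bitmask of present types, then decode the mask."""
--     mask = 0
--     for v in vulnerabilities:
--         mask |= _BIT.get(v['type'], 0)
--     recs = [msg for bit, msg in _BIT_MESSAGES if mask & bit]
--     recs.append("Schedule regular security assessments")
--     recs.append("Implement continuous security monitoring")
--     return recs
-- ===== Notes on version B (the rewrite author's own statement) =====
-- stated objective: alternative
-- what changed: Replaces A's four separate short-circuiting any() scans with a single pass that ORs each vulnerability's type into an integer bitmask, then decodes the mask bit by bit into messages.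
import Mathlib
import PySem

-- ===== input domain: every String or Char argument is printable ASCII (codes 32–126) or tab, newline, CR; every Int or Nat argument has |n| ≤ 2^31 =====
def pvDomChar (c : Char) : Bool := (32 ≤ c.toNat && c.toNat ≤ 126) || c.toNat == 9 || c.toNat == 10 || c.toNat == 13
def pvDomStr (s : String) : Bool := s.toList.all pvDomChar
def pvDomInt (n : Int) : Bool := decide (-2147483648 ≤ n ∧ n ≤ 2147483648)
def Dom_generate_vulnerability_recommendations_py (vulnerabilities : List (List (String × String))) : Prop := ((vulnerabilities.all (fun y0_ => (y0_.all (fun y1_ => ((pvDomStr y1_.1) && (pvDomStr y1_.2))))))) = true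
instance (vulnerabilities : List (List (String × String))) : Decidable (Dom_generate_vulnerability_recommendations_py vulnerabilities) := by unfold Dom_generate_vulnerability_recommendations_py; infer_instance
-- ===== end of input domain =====

-- B replaces A's four short-circuiting scans with one pass OR-ing a bitmask of present types, then decodes the mask; objective: alternative.

-- ===== PORT A =====
def generate_vulnerability_recommendations_py (vulnerabilities : List (List (String × String))) : List String :=
  let recommendations : List String := []
  let recommendations :=
    if vulnerabilities.any (fun v => (PySem.Dict.mk v).get? "type" == some "unencrypted_data") then
      recommendations ++ ["Implement comprehensive data encryption strategy"] else recommendations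
  let recommendations :=
    if vulnerabilities.any (fun v => (PySem.Dict.mk v).get? "type" == some "weak_passwords") then
      recommendations ++ ["Strengthen password policy and implement MFA"] else recommendations
  let recommendations :=
    if vulnerabilities.any (fun v => (PySem.Dict.mk v).get? "type" == some "outdated_dependencies") then
      recommendations ++ ["Establish regular dependency update schedule"] else recommendations
  let recommendations :=
    if vulnerabilities.any (fun v => (PySem.Dict.mk v).get? "type" == some "excessive_permissions") then
      recommendations ++ ["Conduct access review and implement least privilege principle"] else recommendations
  recommendations ++ ["Schedule regular security assessments", "Implement continuous security monitoring"]

-- ===== PORT B =====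
def pvBitTable : List (String × Nat) :=
  [("unencrypted_data", 1), ("weak_passwords", 2), ("outdated_dependencies", 4), ("excessive_permissions", 8)]

def pvBitMessages : List (Nat × String) :=
  [(1, "Implement comprehensive data encryption strategy"),
   (2, "Strengthen password policy and implement MFA"),
   (4, "Establish regular dependency update schedule"),
   (8, "Conduct access review and implement least privilege principle")]

def generate_vulnerability_recommendations_py_alt (vulnerabilities : List (List (String × String))) : List String :=
  -- mask |= _BIT.get(v['type'], 0); inside Pre_ every 'type' lookup succeeds, so getD "" is exact
  let mask : Nat := vulnerabilities.foldl
    (fun m v => m ||| (PySem.Dict.mk pvBitTable).getD (((PySem.Dict.mk v).get? "type").getD "") 0) 0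
  let recs : List String :=
    pvBitMessages.filterMap (fun p => if mask &&& p.1 ≠ 0 then some p.2 else none)
  recs ++ ["Schedule regular security assessments", "Implement continuous security monitoring"]

-- ===== PRECONDITION & SPEC =====
-- Pre_ excludes inputs with a dict lacking the 'type' key: A raises KeyError on almost all of them, and on the
-- rare such inputs where every any() short-circuits before the bad dict A still returns while B raises KeyError.
def Pre_generate_vulnerability_recommendations_py (vulnerabilities : List (List (String × String))) : Prop :=
  ∀ v ∈ vulnerabilities, v.any (fun p => p.1 == "type") = true
instance (vulnerabilities : List (List (String × String))) : Decidable (Pre_generate_vulnerability_recommendations_py vulnerabilities) := by unfold Pre_generate_vulnerability_recommendations_py; infer_instance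

def pvWitness_generate_vulnerability_recommendations_py : (List (List (String × String))) :=
  [[("type", "weak_passwords")], [("type", "other"), ("sev", "low")]]

def Spec_generate_vulnerability_recommendations_py (vulnerabilities : List (List (String × String))) (out : List String) : Prop := out = generate_vulnerability_recommendations_py_alt vulnerabilities
instance (vulnerabilities : List (List (String × String))) (out : List String) : Decidable (Spec_generate_vulnerability_recommendations_py vulnerabilities out) := by unfold Spec_generate_vulnerability_recommendations_py; infer_instance

-- ===== CLAIM (what is proved, stated in full; the proofs are below) =====
def Claim_equal_generate_vulnerability_recommendations_py : Prop := ∀ (vulnerabilities : List (List (String × String))), Dom_generate_vulnerability_recommendations_py vulnerabilities → Pre_generate_vulnerability_recommendations_py vulnerabilities → Spec_generate_vulnerability_recommendations_py vulnerabilities (generate_vulnerability_recommendations_py vulnerabilities)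

-- ===== LEMMAS AND PROOFS =====

-- testBit distributes over the OR-fold: bit i of the accumulated mask = bit i set by some element.
theorem pv_testBit_foldl_lor {α : Type} (f : α → Nat) (i : Nat) :
    ∀ (vs : List α) (m : Nat),
      (vs.foldl (fun m v => m ||| f v) m).testBit i = (m.testBit i || vs.any (fun v => (f v).testBit i))
  | [], m => by simp
  | v :: vs, m => by
    simp only [List.foldl_cons, List.any_cons, pv_testBit_foldl_lor f i vs]
    rw [Nat.testBit_or]
    cases m.testBit i <;> cases (f v).testBit i <;> simp

-- bit i of an element's contribution = that element's 'type' value is the i-th table key (i < 4).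
theorem pv_testBit_bit (t u : String) (i : Nat) (hi : i < 4)
    (ht : pvBitTable[i]?.map Prod.fst = some u) :
    ((PySem.Dict.mk pvBitTable).getD t 0).testBit i = (t == u) := by
  by_cases h1 : t = "unencrypted_data"
  · subst h1; interval_cases i <;> simp [pvBitTable] at ht <;> subst ht <;> decide
  by_cases h2 : t = "weak_passwords"
  · subst h2; interval_cases i <;> simp [pvBitTable] at ht <;> subst ht <;> decide
  by_cases h3 : t = "outdated_dependencies"
  · subst h3; interval_cases i <;> simp [pvBitTable] at ht <;> subst ht <;> decide
  by_cases h4 : t = "excessive_permissions"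
  · subst h4; interval_cases i <;> simp [pvBitTable] at ht <;> subst ht <;> decide
  · have e1 : ("unencrypted_data" == t) = false := beq_eq_false_iff_ne.mpr (Ne.symm h1)
    have e2 : ("weak_passwords" == t) = false := beq_eq_false_iff_ne.mpr (Ne.symm h2)
    have e3 : ("outdated_dependencies" == t) = false := beq_eq_false_iff_ne.mpr (Ne.symm h3)
    have e4 : ("excessive_permissions" == t) = false := beq_eq_false_iff_ne.mpr (Ne.symm h4)
    have hz : (PySem.Dict.mk pvBitTable).getD t 0 = 0 := by
      simp [pvBitTable, PySem.Dict.getD, PySem.Dict.get?, List.find?, e1, e2, e3, e4]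
    rw [hz]
    have hne : (t == u) = false := by
      interval_cases i <;> simp [pvBitTable] at ht <;> subst ht <;>
        exact beq_eq_false_iff_ne.mpr (by assumption)
    simp [hne]

-- under Pre_, bit i of the mask = A's any-scan for the i-th type.
theorem pv_mask_testBit (vs : List (List (String × String)))
    (hpre : Pre_generate_vulnerability_recommendations_py vs) (i : Nat) (hi : i < 4)
    (u : String) (ht : pvBitTable[i]?.map Prod.fst = some u) :
    (vs.foldl (fun m v =>
        m ||| (PySem.Dict.mk pvBitTable).getD (((PySem.Dict.mk v).get? "type").getD "") 0) 0).testBit i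
      = vs.any (fun v => (PySem.Dict.mk v).get? "type" == some u) := by
  rw [pv_testBit_foldl_lor]
  simp only [Nat.zero_testBit, Bool.false_or]
  rw [Bool.eq_iff_iff, List.any_eq_true, List.any_eq_true]
  constructor <;> rintro ⟨v, hv, he⟩ <;> refine ⟨v, hv, ?_⟩
  · have hk := hpre v hv
    rw [List.any_eq_true] at hk
    obtain ⟨p, hp, hpk⟩ := hk
    have hsome : ((PySem.Dict.mk v).get? "type").isSome := by
      rw [← PySem.Dict.contains_eq_isSome_get?]
      simp only [PySem.Dict.contains_mk]
      rw [List.any_eq_true]; exact ⟨p, hp, hpk⟩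
    obtain ⟨w, hw⟩ := Option.isSome_iff_exists.mp hsome
    rw [hw] at he ⊢
    simp only [Option.getD_some] at he
    rw [pv_testBit_bit w u i hi ht] at he
    simp only [beq_iff_eq] at he
    simp [he]
  · simp only [beq_iff_eq] at he
    rw [he]
    simp only [Option.getD_some]
    rw [pv_testBit_bit u u i hi ht]
    simp

theorem pv_and_pow (m i b : Nat) (hb : b = 2 ^ i) : (m &&& b ≠ 0) ↔ m.testBit i = true := by
  rw [hb, Nat.and_two_pow]
  cases h : m.testBit i <;> simp [Nat.pow_eq_zero]

-- ===== VERDICT (by name: the statement is the Claim_ definition above) =====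
theorem generate_vulnerability_recommendations_py_spec : Claim_equal_generate_vulnerability_recommendations_py := by
  intro vs _ hpre
  unfold Spec_generate_vulnerability_recommendations_py
  unfold generate_vulnerability_recommendations_py generate_vulnerability_recommendations_py_alt
  have h0 := pv_mask_testBit vs hpre 0 (by norm_num) "unencrypted_data" rfl
  have h1 := pv_mask_testBit vs hpre 1 (by norm_num) "weak_passwords" rfl
  have h2 := pv_mask_testBit vs hpre 2 (by norm_num) "outdated_dependencies" rfl
  have h3 := pv_mask_testBit vs hpre 3 (by norm_num) "excessive_permissions" rfl
  have c0 := pv_and_pow (vs.foldl (fun m v => m ||| (PySem.Dict.mk pvBitTable).getD (((PySem.Dict.mk v).get? "type").getD "") 0) 0) 0 1 rfl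
  have c1 := pv_and_pow (vs.foldl (fun m v => m ||| (PySem.Dict.mk pvBitTable).getD (((PySem.Dict.mk v).get? "type").getD "") 0) 0) 1 2 rfl
  have c2 := pv_and_pow (vs.foldl (fun m v => m ||| (PySem.Dict.mk pvBitTable).getD (((PySem.Dict.mk v).get? "type").getD "") 0) 0) 2 4 rfl
  have c3 := pv_and_pow (vs.foldl (fun m v => m ||| (PySem.Dict.mk pvBitTable).getD (((PySem.Dict.mk v).get? "type").getD "") 0) 0) 3 8 rfl
  rw [h0] at c0; rw [h1] at c1; rw [h2] at c2; rw [h3] at c3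
  simp only [pvBitMessages, List.filterMap_cons, List.filterMap_nil, c0, c1, c2, c3]
  cases e0 : vs.any (fun v => (PySem.Dict.mk v).get? "type" == some "unencrypted_data") <;>
  cases e1 : vs.any (fun v => (PySem.Dict.mk v).get? "type" == some "weak_passwords") <;>
  cases e2 : vs.any (fun v => (PySem.Dict.mk v).get? "type" == some "outdated_dependencies") <;>
  cases e3 : vs.any (fun v => (PySem.Dict.mk v).get? "type" == some "excessive_permissions") <;>
  simp [e0, e1, e2, e3]
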